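-- pv_equiv track=rewrite | github.com/bhargavvvk/CD | ll1.py | construct_parsing_table
-- ===== SOURCE A (Python) =====
-- def construct_parsing_table(productions, first_sets, follow_sets):
--     table = {}
--     for prod in productions:
--         lhs = prod[0]
--         rhs = prod[2:]
--
--         table.setdefault(lhs, {})
--
--         first_rhs = set()
--         if rhs == '#':
--             first_rhs.add('#')
--         else:
--             for i in range(len(rhs)):
--                 if not rhs[i].isupper():
--                     first_rhs.add(rhs[i])
--                     break
--                 sub_first = first_sets[rhs[i]]
--                 first_rhs.update(sub_first - {'#'})
--                 if '#' not in sub_first: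
--                     break
--             else:
--                 first_rhs.add('#')
--
--         for terminal in first_rhs - {'#'}:
--             table[lhs][terminal] = rhs
--         if '#' in first_rhs:
--             for terminal in follow_sets[lhs]:
--                 table[lhs][terminal] = '#'
--
--     return table
-- ===== SOURCE B (Python) =====
-- def first_of_sequence(s, first_sets):
--     # FIRST of a sentential form: FIRST(X alpha) = FIRST(X) if X not nullable,
--     # else (FIRST(X) - {#}) | FIRST(alpha); FIRST('') = {#}; FIRST(t alpha) = {t}.
--     if s == '':
--         return {'#'}
--     x = s[0]
--     if not x.isupper():
--         return {x}
--     sub = first_sets[x]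
--     if '#' in sub:
--         return (sub - {'#'}) | first_of_sequence(s[1:], first_sets)
--     return set(sub)
--
--
-- def construct_parsing_table(productions, first_sets, follow_sets):
--     table = {}
--     for prod in productions:
--         lhs = prod[0]
--         rhs = prod[2:]
--         f = first_of_sequence(rhs, first_sets)
--         entries = [(t, rhs) for t in f if t != '#']
--         if '#' in f:
--             entries += [(t, '#') for t in follow_sets[lhs]]
--         row = table.setdefault(lhs, {})
--         row.update(entries)
--     return table
-- ===== Notes on version B (the rewrite author's own statement) =====
-- stated objective: simpler
-- what changed: A computes FIRST(rhs) with an indexed for/else loop with breaks plus a special case for rhs=='#' and writes table cells one by one in two separate terminal loops; B replaces this with a recursive first_of_sequence helper (FIRST(Xα)=FIRST(X) if X not nullable else (FIRST(X)-{#}) ∪ FIRST(α), which subsumes the '#' special case) and fills each row with a single update from one precomputed entry list.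
import Mathlib
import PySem

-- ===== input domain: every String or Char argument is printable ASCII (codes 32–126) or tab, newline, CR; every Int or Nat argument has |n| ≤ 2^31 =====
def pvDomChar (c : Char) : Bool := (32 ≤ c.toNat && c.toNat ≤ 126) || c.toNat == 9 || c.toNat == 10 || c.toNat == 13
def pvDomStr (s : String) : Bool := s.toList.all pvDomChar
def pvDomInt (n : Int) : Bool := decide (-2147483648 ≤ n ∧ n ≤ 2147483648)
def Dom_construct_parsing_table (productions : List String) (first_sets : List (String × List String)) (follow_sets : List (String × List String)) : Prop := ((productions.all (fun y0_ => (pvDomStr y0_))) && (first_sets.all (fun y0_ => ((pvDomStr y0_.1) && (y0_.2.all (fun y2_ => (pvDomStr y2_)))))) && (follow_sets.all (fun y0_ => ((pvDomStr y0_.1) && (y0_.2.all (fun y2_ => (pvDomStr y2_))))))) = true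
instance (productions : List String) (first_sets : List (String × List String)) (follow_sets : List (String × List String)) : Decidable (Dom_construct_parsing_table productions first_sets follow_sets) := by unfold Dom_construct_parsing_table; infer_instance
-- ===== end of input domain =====

-- ===== PORT A =====
-- B extracts FIRST-of-a-sentential-form as a recursive helper and fills each row from one
-- entry list; same return value as A (objective: simpler decomposition, not faster).
-- first_rhs loop of A: for/else with break over the rhs characters, accumulating a set
def pvSubFirstA (fd : PySem.Dict String (List String)) (acc : PySem.Set String) : List Char → PySem.Set String
  | [] => PySem.Set.add acc "#"
  | c :: rest =>
    if !(PySem.Chars.isupper c) then PySem.Set.add acc (String.ofList [c])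
    else
      let sub := fd.getD (String.ofList [c]) []   -- Pre_ guarantees the key is present (KeyError otherwise)
      let acc2 := PySem.Set.update acc (PySem.Set.diff (PySem.Set.ofList sub) ["#"])
      if "#" ∈ sub then pvSubFirstA fd acc2 rest else acc2

def construct_parsing_table (productions : List String) (first_sets : List (String × List String)) (follow_sets : List (String × List String)) : List (String × List (String × String)) :=
  let fd := PySem.Dict.ofList first_sets
  let wd := PySem.Dict.ofList follow_sets
  let table : PySem.Dict String (PySem.Dict String String) := productions.foldl
    (fun table prod =>
      let chars := prod.toList
      let lhs := String.ofList [chars.headD ' ']   -- prod[0]; Pre_ guarantees prod ≠ "" (IndexError otherwise)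
      let rhs := chars.drop 2
      let table1 := table.setdefault lhs PySem.Dict.empty
      let first_rhs : PySem.Set String :=
        if rhs = ['#'] then PySem.Set.add PySem.Set.empty "#"
        else pvSubFirstA fd PySem.Set.empty rhs
      let table2 := (PySem.Set.diff first_rhs ["#"]).foldl
        (fun t term => t.modify lhs PySem.Dict.empty (fun row => row.insert term (String.ofList rhs))) table1
      if "#" ∈ first_rhs then
        (PySem.Set.ofList (wd.getD lhs [])).foldl
          (fun t term => t.modify lhs PySem.Dict.empty (fun row => row.insert term "#")) table2
      else table2)
    PySem.Dict.empty
  table.items.map (fun p => (p.1, p.2.items))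

-- ===== PORT B =====
-- FIRST(Xα) = FIRST(X) if X not nullable else (FIRST(X)-{#}) ∪ FIRST(α); FIRST('') = {#}
def pvFirstOfSeq (fd : PySem.Dict String (List String)) : List Char → PySem.Set String
  | [] => PySem.Set.ofList ["#"]
  | c :: rest =>
    if !(PySem.Chars.isupper c) then PySem.Set.ofList [String.ofList [c]]
    else
      let sub := fd.getD (String.ofList [c]) []   -- Pre_ guarantees the key is present
      if "#" ∈ sub then PySem.Set.union (PySem.Set.diff (PySem.Set.ofList sub) ["#"]) (pvFirstOfSeq fd rest)
      else PySem.Set.ofList sub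

def pvRowEntries (fd : PySem.Dict String (List String)) (wd : PySem.Dict String (List String)) (lhs : String) (rhs : List Char) : List (String × String) :=
  let f := pvFirstOfSeq fd rhs
  let entries := (f.filter (fun t => t ≠ "#")).map (fun t => (t, String.ofList rhs))
  if "#" ∈ f then entries ++ (PySem.Set.ofList (wd.getD lhs [])).map (fun t => (t, "#"))
  else entries

def construct_parsing_table_alt (productions : List String) (first_sets : List (String × List String)) (follow_sets : List (String × List String)) : List (String × List (String × String)) :=
  let fd := PySem.Dict.ofList first_sets
  let wd := PySem.Dict.ofList follow_sets
  let table : PySem.Dict String (PySem.Dict String String) := productions.foldl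
    (fun table prod =>
      let chars := prod.toList
      let lhs := String.ofList [chars.headD ' ']   -- prod[0]; Pre_ guarantees prod ≠ ""
      (table.setdefault lhs PySem.Dict.empty).modify lhs PySem.Dict.empty
        (fun row => row.update (pvRowEntries fd wd lhs (chars.drop 2))))
    PySem.Dict.empty
  table.items.map (fun p => (p.1, p.2.items))

-- ===== PRECONDITION & SPEC =====
-- a rhs symbol the FIRST scan steps over: an uppercase nonterminal whose FIRST entry contains '#'
def pvNullable (fd : PySem.Dict String (List String)) (c : Char) : Bool :=
  PySem.Chars.isupper c && ("#" ∈ fd.getD (String.ofList [c]) [])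

-- Pre_ = exactly the inputs where the Python returns (closed form, via the maximal nullable
-- prefix of each rhs): every production is nonempty (prod[0] raises IndexError on ''), the first
-- rhs symbol after the nullable prefix has a first_sets entry if it is uppercase (KeyError), and
-- lhs has a follow_sets entry when the rhs is all-nullable or stops at the terminal '#',
-- i.e. when '#' ∈ FIRST(rhs) and FOLLOW(lhs) is read (KeyError).
def Pre_construct_parsing_table (productions : List String) (first_sets : List (String × List String)) (follow_sets : List (String × List String)) : Prop :=
  ∀ prod ∈ productions,
    prod.toList ≠ [] ∧
    ((((prod.toList.drop 2).dropWhile (pvNullable (PySem.Dict.ofList first_sets))).head?.elim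
        true (fun c => !PySem.Chars.isupper c ||
          (PySem.Dict.ofList first_sets).contains (String.ofList [c]))) = true) ∧
    ((((prod.toList.drop 2).dropWhile (pvNullable (PySem.Dict.ofList first_sets))).head?.getD '#') = '#' →
       (PySem.Dict.ofList follow_sets).contains (String.ofList [prod.toList.headD ' ']) = true)
instance (productions : List String) (first_sets : List (String × List String)) (follow_sets : List (String × List String)) : Decidable (Pre_construct_parsing_table productions first_sets follow_sets) := by unfold Pre_construct_parsing_table; infer_instance

def pvWitness_construct_parsing_table : List String × (List (String × List String)) × (List (String × List String)) :=
  (["S=aB", "B=#"], [("S", ["a"]), ("B", ["#"])], [("S", ["$"]), ("B", ["$"])])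

def Spec_construct_parsing_table (productions : List String) (first_sets : List (String × List String)) (follow_sets : List (String × List String)) (out : List (String × List (String × String))) : Prop := out = construct_parsing_table_alt productions first_sets follow_sets
instance (productions : List String) (first_sets : List (String × List String)) (follow_sets : List (String × List String)) (out : List (String × List (String × String))) : Decidable (Spec_construct_parsing_table productions first_sets follow_sets out) := by unfold Spec_construct_parsing_table; infer_instance

-- ===== CLAIM (what is proved, stated in full; the proofs are below) =====
def Claim_equal_construct_parsing_table : Prop := ∀ (productions : List String) (first_sets : List (String × List String)) (follow_sets : List (String × List String)), Dom_construct_parsing_table productions first_sets follow_sets → Pre_construct_parsing_table productions first_sets follow_sets → Spec_construct_parsing_table productions first_sets follow_sets (construct_parsing_table productions first_sets follow_sets)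

-- ===== LEMMAS AND PROOFS =====

-- set-library style facts specific to the shapes in these two ports
theorem pv_update_add {a d : PySem.Set String} {x : String} :
    PySem.Set.update a (PySem.Set.add d x) = PySem.Set.add (PySem.Set.update a d) x := by
  by_cases h : x ∈ d
  · rw [PySem.Set.add_of_mem h, PySem.Set.add_of_mem (by rw [PySem.Set.mem_update]; exact Or.inr h)]
  · rw [PySem.Set.add_of_not_mem h, PySem.Set.update_append, PySem.Set.update_cons, PySem.Set.update_nil]

theorem pv_update_update (a d : PySem.Set String) (xs : List String) :
    PySem.Set.update a (PySem.Set.update d xs) = PySem.Set.update (PySem.Set.update a d) xs := by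
  induction xs generalizing d with
  | nil => rw [PySem.Set.update_nil, PySem.Set.update_nil]
  | cons x xs ih => rw [PySem.Set.update_cons, PySem.Set.update_cons, ih, pv_update_add]

theorem pv_firstOfSeq_nodup (fd : PySem.Dict String (List String)) (rhs : List Char) :
    (pvFirstOfSeq fd rhs).Nodup := by
  induction rhs with
  | nil => simp [pvFirstOfSeq]
  | cons c rest ih =>
    unfold pvFirstOfSeq
    split
    · exact PySem.Set.nodup_ofList _
    · dsimp only
      split
      · exact PySem.Set.nodup_union _ _ (PySem.Set.nodup_diff _ _ (PySem.Set.nodup_ofList _))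
      · exact PySem.Set.nodup_ofList _

-- A's for/else loop over the rhs, started from any accumulator, is acc ∪ FIRST(rhs)
theorem pv_subFirstA_eq (fd : PySem.Dict String (List String)) (rhs : List Char) (acc : PySem.Set String) :
    pvSubFirstA fd acc rhs = PySem.Set.update acc (pvFirstOfSeq fd rhs) := by
  induction rhs generalizing acc with
  | nil =>
    show PySem.Set.add acc "#" = _
    rw [pvFirstOfSeq]
    rw [show PySem.Set.ofList ["#"] = ["#"] from rfl, PySem.Set.update_cons, PySem.Set.update_nil]
  | cons c rest ih =>
    rw [pvSubFirstA, pvFirstOfSeq]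
    by_cases hu : PySem.Chars.isupper c
    · simp only [hu, Bool.not_true, Bool.false_eq_true, if_false]
      by_cases hs : "#" ∈ fd.getD (String.ofList [c]) []
      · simp only [if_pos hs, ih]
        rw [PySem.Set.union, (pv_update_update _ _ _).symm]
      · simp only [if_neg hs]
        have hd : PySem.Set.diff (PySem.Set.ofList (fd.getD (String.ofList [c]) [])) ["#"]
            = PySem.Set.ofList (fd.getD (String.ofList [c]) []) := by
          rw [PySem.Set.diff]
          apply List.filter_eq_self.2
          intro x hx
          have hxs : x ∈ fd.getD (String.ofList [c]) [] := (PySem.Set.mem_ofList _ _).1 hx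
          have : x ≠ "#" := fun h => hs (h ▸ hxs)
          simp [PySem.Set.contains_eq_listContains, this]
        rw [hd]
    · simp only [hu, Bool.not_false, if_true]
      rw [show PySem.Set.ofList [String.ofList [c]] = [String.ofList [c]] from rfl,
        PySem.Set.update_cons, PySem.Set.update_nil]

-- A's first_rhs (special case and loop together) is exactly B's FIRST of the rhs
theorem pv_firstA_eq (fd : PySem.Dict String (List String)) (rhs : List Char) :
    (if rhs = ['#'] then PySem.Set.add PySem.Set.empty "#" else pvSubFirstA fd PySem.Set.empty rhs)
      = pvFirstOfSeq fd rhs := by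
  by_cases h : rhs = ['#']
  · subst h; rfl
  · rw [if_neg h, pv_subFirstA_eq, PySem.Set.update_empty,
      PySem.Set.ofList_eq_self_of_nodup _ (pv_firstOfSeq_nodup fd rhs)]

-- re-inserting the value a key already holds changes nothing (keys unique)
theorem pv_insert_get_self (d : PySem.Dict String (PySem.Dict String String)) (k : String)
    (v : PySem.Dict String String) (h : d.get? k = some v) (hnd : d.keys.Nodup) :
    d.insert k v = d := by
  apply PySem.Dict.ext
  rw [PySem.Dict.items_insert_of_contains d v (by rw [PySem.Dict.contains_eq_isSome_get?, h]; rfl)]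
  conv_rhs => rw [← List.map_id d.items]
  apply List.map_congr_left
  intro p hp
  by_cases hk : (p.1 == k) = true
  · have hk' : p.1 = k := by simpa using hk
    have hpv : d.get? p.1 = some p.2 := PySem.Dict.get?_of_mem_items d (by simpa using hp) hnd
    rw [hk'] at hpv
    have hv2 : p.2 = v := by
      have := hpv.symm.trans h
      simpa using this
    rw [if_pos hk, ← hk', ← hv2, id]
  · rw [if_neg hk, id]

theorem pv_modify_id (d : PySem.Dict String (PySem.Dict String String)) (k : String)
    (hc : d.contains k = true) (hnd : d.keys.Nodup) :
    d.modify k PySem.Dict.empty (fun row => row) = d := by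
  rw [PySem.Dict.modify]
  have hg : (d.get? k).isSome := by rw [← PySem.Dict.contains_eq_isSome_get?]; exact hc
  rcases Option.isSome_iff_exists.1 hg with ⟨v, hv⟩
  rw [PySem.Dict.getD_of_get?_eq_some _ _ hv, pv_insert_get_self d k v hv hnd]

theorem pv_modify_modify (d : PySem.Dict String (PySem.Dict String String)) (k : String)
    (f g : PySem.Dict String String → PySem.Dict String String) :
    (d.modify k PySem.Dict.empty f).modify k PySem.Dict.empty g
      = d.modify k PySem.Dict.empty (fun row => g (f row)) := by
  simp [PySem.Dict.modify, PySem.Dict.getD_insert_self, PySem.Dict.insert_insert_self]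

theorem pv_nodup_keys_modify (d : PySem.Dict String (PySem.Dict String String)) (k : String)
    (d0 : PySem.Dict String String) (f : PySem.Dict String String → PySem.Dict String String)
    (hnd : d.keys.Nodup) : (d.modify k d0 f).keys.Nodup := by
  rw [PySem.Dict.modify]
  exact PySem.Dict.nodup_keys_insert _ _ _ hnd

theorem pv_contains_setdefault_self (d : PySem.Dict String (PySem.Dict String String)) (k : String) :
    (d.setdefault k PySem.Dict.empty).contains k = true := by
  rw [PySem.Dict.contains_setdefault]; simp

theorem pv_nodup_keys_setdefault (d : PySem.Dict String (PySem.Dict String String)) (k : String)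
    (hnd : d.keys.Nodup) : (d.setdefault k PySem.Dict.empty).keys.Nodup := by
  rw [PySem.Dict.keys_setdefault]
  split
  · exact hnd
  · next hco =>
    refine List.Nodup.append hnd (List.nodup_singleton k) ?_
    intro x hx hy
    simp only [List.mem_singleton] at hy
    subst hy
    exact absurd ((PySem.Dict.contains_iff_mem_keys d x).2 hx) (by simp [hco])

-- a loop of single-cell writes table[lhs][t] = v(t) is one row update
theorem pv_fold_writes (L : List String) (v : String → String)
    (T : PySem.Dict String (PySem.Dict String String)) (lhs : String)
    (hc : T.contains lhs = true) (hnd : T.keys.Nodup) :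
    L.foldl (fun t term => t.modify lhs PySem.Dict.empty (fun row => row.insert term (v term))) T
      = T.modify lhs PySem.Dict.empty (fun row => row.update (L.map (fun t => (t, v t)))) := by
  induction L generalizing T with
  | nil =>
    show T = T.modify lhs PySem.Dict.empty (fun row => row.update [])
    rw [show (fun (row : PySem.Dict String String) => row.update []) = fun row => row from rfl]
    exact (pv_modify_id T lhs hc hnd).symm
  | cons t L ih =>
    show L.foldl _ ((T.modify lhs PySem.Dict.empty (fun row => row.insert t (v t)))) = _
    rw [ih _ (by rw [PySem.Dict.contains_modify]; simp) (pv_nodup_keys_modify _ _ _ _ hnd),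
      pv_modify_modify]
    rfl

theorem pv_diff_filter (f : PySem.Set String) :
    PySem.Set.diff f ["#"] = f.filter (fun t => t ≠ "#") := by
  rw [PySem.Set.diff]
  apply List.filter_congr
  intro x _
  simp [PySem.Set.contains_eq_listContains]

-- the body of A's production loop equals the body of B's production loop
theorem pv_step_eq (fd wd : PySem.Dict String (List String))
    (table : PySem.Dict String (PySem.Dict String String)) (prod : String)
    (hnd : table.keys.Nodup) :
    (let chars := prod.toList
     let lhs := String.ofList [chars.headD ' ']
     let rhs := chars.drop 2
     let table1 := table.setdefault lhs PySem.Dict.empty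
     let first_rhs : PySem.Set String :=
       if rhs = ['#'] then PySem.Set.add PySem.Set.empty "#"
       else pvSubFirstA fd PySem.Set.empty rhs
     let table2 := (PySem.Set.diff first_rhs ["#"]).foldl
       (fun t term => t.modify lhs PySem.Dict.empty (fun row => row.insert term (String.ofList rhs))) table1
     if "#" ∈ first_rhs then
       (PySem.Set.ofList (wd.getD lhs [])).foldl
         (fun t term => t.modify lhs PySem.Dict.empty (fun row => row.insert term "#")) table2
     else table2)
    = (table.setdefault (String.ofList [prod.toList.headD ' ']) PySem.Dict.empty).modify
        (String.ofList [prod.toList.headD ' ']) PySem.Dict.empty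
        (fun row => row.update (pvRowEntries fd wd (String.ofList [prod.toList.headD ' ']) (prod.toList.drop 2))) := by
  dsimp only
  rw [pv_firstA_eq]
  have hc1 := pv_contains_setdefault_self table (String.ofList [prod.toList.headD ' '])
  have hnd1 := pv_nodup_keys_setdefault table (String.ofList [prod.toList.headD ' ']) hnd
  rw [pv_fold_writes _ _ _ _ hc1 hnd1]
  rw [pvRowEntries, pv_diff_filter]
  by_cases hm : "#" ∈ pvFirstOfSeq fd (prod.toList.drop 2)
  · rw [if_pos hm]
    rw [pv_fold_writes _ _ _ _ (by rw [PySem.Dict.contains_modify]; simp)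
      (pv_nodup_keys_modify _ _ _ _ hnd1), pv_modify_modify]
    rw [if_pos hm]
    congr 1
    funext row
    rw [PySem.Dict.update, PySem.Dict.update, PySem.Dict.update, List.foldl_append]
  · rw [if_neg hm]
    rw [if_neg hm]

theorem pv_step_nodup (fd wd : PySem.Dict String (List String))
    (table : PySem.Dict String (PySem.Dict String String)) (prod : String)
    (hnd : table.keys.Nodup) :
    (((table.setdefault (String.ofList [prod.toList.headD ' ']) PySem.Dict.empty).modify
        (String.ofList [prod.toList.headD ' ']) PySem.Dict.empty
        (fun row => row.update (pvRowEntries fd wd (String.ofList [prod.toList.headD ' ']) (prod.toList.drop 2)))).keys).Nodup :=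
  pv_nodup_keys_modify _ _ _ _ (pv_nodup_keys_setdefault _ _ hnd)

-- the whole production fold agrees
theorem pv_fold_eq (fd wd : PySem.Dict String (List String)) (prods : List String)
    (table : PySem.Dict String (PySem.Dict String String)) (hnd : table.keys.Nodup) :
    prods.foldl
      (fun table prod =>
        let chars := prod.toList
        let lhs := String.ofList [chars.headD ' ']
        let rhs := chars.drop 2
        let table1 := table.setdefault lhs PySem.Dict.empty
        let first_rhs : PySem.Set String :=
          if rhs = ['#'] then PySem.Set.add PySem.Set.empty "#"
          else pvSubFirstA fd PySem.Set.empty rhs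
        let table2 := (PySem.Set.diff first_rhs ["#"]).foldl
          (fun t term => t.modify lhs PySem.Dict.empty (fun row => row.insert term (String.ofList rhs))) table1
        if "#" ∈ first_rhs then
          (PySem.Set.ofList (wd.getD lhs [])).foldl
            (fun t term => t.modify lhs PySem.Dict.empty (fun row => row.insert term "#")) table2
        else table2) table
    = prods.foldl
      (fun table prod =>
        let chars := prod.toList
        let lhs := String.ofList [chars.headD ' ']
        (table.setdefault lhs PySem.Dict.empty).modify lhs PySem.Dict.empty
          (fun row => row.update (pvRowEntries fd wd lhs (chars.drop 2)))) table := by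
  induction prods generalizing table with
  | nil => rfl
  | cons prod prods ih =>
    rw [List.foldl_cons, List.foldl_cons, pv_step_eq fd wd table prod hnd]
    exact ih _ (pv_step_nodup fd wd table prod hnd)

-- ===== VERDICT (by name: the statement is the Claim_ definition above) =====
theorem construct_parsing_table_spec : Claim_equal_construct_parsing_table := by
  intro productions first_sets follow_sets _ _
  unfold Spec_construct_parsing_table construct_parsing_table construct_parsing_table_alt
  dsimp only
  rw [pv_fold_eq _ _ _ _ PySem.Dict.nodup_keys_empty]
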